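-- pv_equiv track=rewrite | github.com/baharay/Metu | 2016-Fall/Artificial Intelligence - Ceng462/HW2/the2.py | custom_split
-- ===== SOURCE A (Python) =====
-- def custom_split(line):
-- 		templist = []
-- 		opened = 0
-- 		closed = 0
-- 		lastcut = 0
-- 		size = len(line)
-- 		for i in range(0,size):
-- 			if line[i] == '(':
-- 				opened+=1
-- 			elif (line[i] == ')'):
-- 				closed+=1
-- 			elif line[i] ==',' and closed == opened:
-- 				templist.append(line[lastcut:i])
-- 				lastcut = i+1
-- 		if lastcut  < size:
-- 			templist.append(line[lastcut:])
-- 		return templist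
--
-- templist=0
-- ===== SOURCE B (Python) =====
-- def custom_split(line):
--     result = []
--     current = ''
--     depth = 0
--     for ch in line:
--         if ch == '(':
--             depth += 1
--             current += ch
--         elif ch == ')':
--             depth -= 1
--             current += ch
--         elif ch == ',' and depth == 0:
--             result.append(current)
--             current = ''
--         else:
--             current += ch
--     if current:
--         result.append(current)
--     return result
-- ===== Notes on version B (the rewrite author's own statement) =====
-- stated objective: simpler
-- what changed: Replaces A's index loop with slicing bookkeeping (opened/closed counters, lastcut index, line[lastcut:i] slices) by a direct character-accumulator scan with a single net-depth counter, pushing the accumulated token at each top-level comma.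
import Mathlib
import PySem

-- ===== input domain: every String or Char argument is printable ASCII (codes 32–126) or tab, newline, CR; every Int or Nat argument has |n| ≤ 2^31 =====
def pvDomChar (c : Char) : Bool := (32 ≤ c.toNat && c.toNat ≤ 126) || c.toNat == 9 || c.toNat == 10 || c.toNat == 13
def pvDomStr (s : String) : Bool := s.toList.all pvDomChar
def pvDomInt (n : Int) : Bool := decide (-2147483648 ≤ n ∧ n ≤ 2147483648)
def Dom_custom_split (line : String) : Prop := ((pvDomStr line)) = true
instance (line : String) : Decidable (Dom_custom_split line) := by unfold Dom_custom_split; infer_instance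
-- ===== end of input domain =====

-- B replaces A's index/slice bookkeeping with a character-accumulator scan and a single
-- net-depth counter (objective: simpler; same O(n) cost).


-- ===== PORT A =====
-- A's loop over i in range(0,size): state (templist, opened, closed, lastcut); the slice
-- line[lastcut:i] (0 ≤ lastcut ≤ i ≤ size) is exactly (cs.drop lastcut).take (i - lastcut).
def customAloop (cs : List Char) : List Char → Nat →
    (List (List Char) × Nat × Nat × Nat) → List (List Char) × Nat × Nat × Nat
  | [], _, st => st
  | ch :: rest, i, (templist, opened, closed, lastcut) =>
    if ch = '(' then
      customAloop cs rest (i + 1) (templist, opened + 1, closed, lastcut)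
    else if ch = ')' then
      customAloop cs rest (i + 1) (templist, opened, closed + 1, lastcut)
    else if ch = ',' ∧ closed = opened then
      customAloop cs rest (i + 1)
        (templist ++ [(cs.drop lastcut).take (i - lastcut)], opened, closed, i + 1)
    else
      customAloop cs rest (i + 1) (templist, opened, closed, lastcut)

def custom_split (line : String) : List String :=
  let cs := line.toList
  let size := cs.length
  let st := customAloop cs cs 0 ([], 0, 0, 0)
  let templist := st.1
  let lastcut := st.2.2.2
  let templist := if lastcut < size then templist ++ [cs.drop lastcut] else templist
  templist.map String.mk

-- ===== PORT B =====
-- B's scan: state (result, current, depth); push current at a top-level comma.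
def customBloop : List Char → (List (List Char) × List Char × Int) →
    List (List Char) × List Char × Int
  | [], st => st
  | ch :: rest, (result, current, depth) =>
    if ch = '(' then
      customBloop rest (result, current ++ [ch], depth + 1)
    else if ch = ')' then
      customBloop rest (result, current ++ [ch], depth - 1)
    else if ch = ',' ∧ depth = 0 then
      customBloop rest (result ++ [current], [], depth)
    else
      customBloop rest (result, current ++ [ch], depth)

def custom_split_alt (line : String) : List String :=
  let st := customBloop line.toList ([], [], 0)
  let result := st.1
  let current := st.2.1
  let result := if current ≠ [] then result ++ [current] else result
  result.map String.mk

-- ===== PRECONDITION & SPEC =====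
def Spec_custom_split (line : String) (out : List String) : Prop := out = custom_split_alt line
instance (line : String) (out : List String) : Decidable (Spec_custom_split line out) := by unfold Spec_custom_split; infer_instance

-- ===== CLAIM (what is proved, stated in full; the proofs are below) =====
def Claim_equal_custom_split : Prop := ∀ (line : String), Dom_custom_split line → Spec_custom_split line (custom_split line)

-- ===== LEMMAS AND PROOFS =====

-- Core invariant: running B's scan on the remaining suffix, starting from A's state
-- (current = the slice since lastcut, depth = opened - closed), lands in the state
-- corresponding to A's final loop state.
theorem loop_equiv (cs : List Char) :
    ∀ (rest : List Char) (i : Nat) (tl : List (List Char)) (o c lc : Nat),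
      cs.drop i = rest → lc ≤ i →
      customBloop rest (tl, (cs.drop lc).take (i - lc), (o : Int) - (c : Int)) =
        ((customAloop cs rest i (tl, o, c, lc)).1,
         (cs.drop (customAloop cs rest i (tl, o, c, lc)).2.2.2).take
           (i + rest.length - (customAloop cs rest i (tl, o, c, lc)).2.2.2),
         ((customAloop cs rest i (tl, o, c, lc)).2.1 : Int) -
           ((customAloop cs rest i (tl, o, c, lc)).2.2.1 : Int)) ∧
      (customAloop cs rest i (tl, o, c, lc)).2.2.2 ≤ i + rest.length := by
  intro rest
  induction rest with
  | nil =>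
    intro i tl o c lc hdrop hle
    simp [customAloop, customBloop, hle]
  | cons ch rest ih =>
    intro i tl o c lc hdrop hle
    have hi : i < cs.length := by
      by_contra h
      have : cs.drop i = [] := List.drop_eq_nil_of_le (by omega)
      rw [this] at hdrop; cases hdrop
    have hdrop' : cs.drop (i + 1) = rest := by
      have h := List.drop_drop (l := cs) (i := 1) (j := i)
      rw [hdrop] at h
      simpa using h.symm
    have hget : cs[i]'hi = ch := by
      have : (cs.drop i)[0]'(by simp [hdrop]) = ch := by simp [hdrop]
      simpa using this
    have hcur : ∀ lc' : Nat, lc' ≤ i →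
        (cs.drop lc').take (i + 1 - lc') = (cs.drop lc').take (i - lc') ++ [ch] := by
      intro lc' hlc'
      have h1 : i + 1 - lc' = (i - lc') + 1 := by omega
      rw [h1, List.take_succ]
      have hsome : (cs.drop lc')[i - lc']? = some ch := by
        rw [List.getElem?_drop]
        have h2 : lc' + (i - lc') = i := by omega
        rw [h2, List.getElem?_eq_getElem hi, hget]
      simp [hsome]
    by_cases h1 : ch = '('
    · subst h1
      have hrec := ih (i + 1) tl (o + 1) c lc hdrop' (by omega)
      rw [hcur lc hle] at hrec
      have e : ((o + 1 : Nat) : Int) - (c : Int) = (o : Int) - (c : Int) + 1 := by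
        push_cast; ring
      rw [e] at hrec
      simp only [customAloop, customBloop]
      simpa [Nat.add_comm, Nat.add_left_comm, Nat.add_assoc] using hrec
    · by_cases h2 : ch = ')'
      · subst h2
        have hrec := ih (i + 1) tl o (c + 1) lc hdrop' (by omega)
        rw [hcur lc hle] at hrec
        have e : (o : Int) - ((c + 1 : Nat) : Int) = (o : Int) - (c : Int) - 1 := by
          push_cast; ring
        rw [e] at hrec
        simp only [customAloop, customBloop]
        simpa [Nat.add_comm, Nat.add_left_comm, Nat.add_assoc] using hrec
      · by_cases h3 : ch = ',' ∧ c = o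
        · obtain ⟨hc, hco⟩ := h3
          subst hc
          subst hco
          have hrec := ih (i + 1) (tl ++ [(cs.drop lc).take (i - lc)]) c c (i + 1)
            hdrop' (le_refl _)
          simp only [Nat.sub_self, List.take_zero] at hrec
          simp only [customAloop, customBloop]
          simp only [if_neg h1, if_neg h2, sub_self, and_self, if_pos rfl,
            if_pos (And.intro rfl rfl)]
          simpa [Nat.add_comm, Nat.add_left_comm, Nat.add_assoc] using hrec
        · have h3' : ¬ (ch = ',' ∧ (o : Int) - (c : Int) = 0) := by
            rintro ⟨hc, hz⟩
            exact h3 ⟨hc, by omega⟩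
          have hrec := ih (i + 1) tl o c lc hdrop' (by omega)
          rw [hcur lc hle] at hrec
          simp only [customAloop, customBloop, if_neg h1, if_neg h2, if_neg h3,
            if_neg h3', List.length_cons]
          simpa [Nat.add_comm, Nat.add_left_comm, Nat.add_assoc] using hrec

-- ===== VERDICT (by name: the statement is the Claim_ definition above) =====
theorem custom_split_spec : Claim_equal_custom_split := by
  intro line _
  unfold Spec_custom_split custom_split custom_split_alt
  obtain ⟨hB, hle⟩ := loop_equiv line.toList line.toList 0 [] 0 0 0 (by simp)
    (Nat.le_refl 0)
  simp only [List.drop_zero, Nat.sub_zero, Nat.zero_add, Int.natCast_zero, sub_zero,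
    List.take_zero, String.length_toList] at hB hle ⊢
  rw [hB]
  generalize customAloop line.toList line.toList 0 ([], 0, 0, 0) = st at hle ⊢
  obtain ⟨tl, o, c, lc⟩ := st
  simp only at hle ⊢
  have hcurr : (line.toList.drop lc).take (line.length - lc) = line.toList.drop lc := by
    apply List.take_of_length_le
    simp
  rw [hcurr]
  by_cases hlt : lc < line.length
  · have hne : line.toList.drop lc ≠ [] := by
      intro h
      have := List.drop_eq_nil_iff.mp h
      simp at this
      omega
    simp [hlt, hne]
  · have heq : line.toList.drop lc = [] := by
      apply List.drop_eq_nil_of_le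
      simp
      omega
    simp [hlt, heq]
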